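-- pv_equiv track=rewrite | github.com/Augcop29/TD-Info-D-B | mainBooty.py | palette_k
-- ===== SOURCE A (Python) =====
-- def palette_k(dict , k) :
--     pal = []
--     for i in range (k) :
--         max = 0
--         key_max = 0
--         for key in dict :
--             if dict[key] > max :
--                 max = dict[key]
--                 key_max = key
--         dict[key_max] = -1
--         pal.append(max)
--     return pal
-- ===== SOURCE B (Python) =====
-- def palette_k(dict, k):
--     vals = sorted((v for v in dict.values() if v > 0), key=lambda v: -v)
--     n = max(k, 0)
--     return vals[:n] + [0] * (n - len(vals))
-- ===== Notes on version B (the rewrite author's own statement) =====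
-- stated objective: faster
-- what changed: Replaces the k repeated full scans (each destructively setting the found maximum's key to -1) with a single filter of the positive values, one descending sort, take k and pad with zeros; B also leaves the input dict unmutated.
import Mathlib
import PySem

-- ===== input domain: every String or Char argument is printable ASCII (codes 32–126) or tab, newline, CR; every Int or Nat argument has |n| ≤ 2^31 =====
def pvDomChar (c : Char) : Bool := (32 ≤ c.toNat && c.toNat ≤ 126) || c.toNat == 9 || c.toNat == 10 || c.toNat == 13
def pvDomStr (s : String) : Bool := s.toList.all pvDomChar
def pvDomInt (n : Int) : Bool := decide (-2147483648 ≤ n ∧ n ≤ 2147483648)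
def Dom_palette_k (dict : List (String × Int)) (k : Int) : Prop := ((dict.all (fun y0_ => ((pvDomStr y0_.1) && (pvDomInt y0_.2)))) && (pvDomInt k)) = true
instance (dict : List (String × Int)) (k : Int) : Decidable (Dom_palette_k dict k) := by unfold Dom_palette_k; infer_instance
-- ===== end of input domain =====

-- B replaces A's k repeated full scans (each destructively zapping the found maximum) by one
-- filter + sort-descending + take/pad, O(n log n + k) instead of O(k·n); equivalence is about the
-- RETURN value only: Python A mutates its dict argument (sets found keys, and possibly the int
-- key 0, to -1) while B leaves it untouched.


-- ===== PORT A =====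
-- 'for i in range(k): scan all keys for the max positive value, set that key to -1, append the max'.
-- Python's key_max starts as the int 0; 'none' here is that sentinel: when no value beat 0,
-- Python executes dict[0] = -1, adding the int key 0 — a key no string lookup ever sees and whose
-- value -1 is never > max ≥ 0, so skipping that write is exact for the returned list.
-- 'for key in dict: … dict[key]' is iterated as the (unique-keyed) items list.
def paletteLoop (d : PySem.Dict String Int) (pal : List Int) : Nat → List Int
  | 0 => pal
  | Nat.succ n =>
      let s := d.items.foldl (fun a p => if p.2 > a.1 then (p.2, some p.1) else a)
        ((0 : Int), (none : Option String))
      let d' := match s.2 with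
        | some km => d.insert km (-1)
        | none => d
      paletteLoop d' (pal ++ [s.1]) n

def palette_k (dict : List (String × Int)) (k : Int) : List Int :=
  paletteLoop (PySem.Dict.ofList dict) [] k.toNat

-- ===== PORT B =====
-- Source B: vals = sorted((v for v in dict.values() if v > 0), key=lambda v: -v); n = max(k, 0);
--       return vals[:n] + [0] * (n - len(vals))
def palette_k_alt (dict : List (String × Int)) (k : Int) : List Int :=
  let vals := PySem.List.sorted (((PySem.Dict.ofList dict).values).filter (fun v => decide (v > 0)))
    (fun v => -v)
  let n := max k 0
  vals.take n.toNat ++ List.replicate (n - (vals.length : Int)).toNat 0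

-- ===== PRECONDITION & SPEC =====
def Spec_palette_k (dict : List (String × Int)) (k : Int) (out : List Int) : Prop := out = palette_k_alt dict k
instance (dict : List (String × Int)) (k : Int) (out : List Int) : Decidable (Spec_palette_k dict k out) := by unfold Spec_palette_k; infer_instance

-- ===== CLAIM (what is proved, stated in full; the proofs are below) =====
def Claim_equal_palette_k : Prop := ∀ (dict : List (String × Int)) (k : Int), Dom_palette_k dict k → Spec_palette_k dict k (palette_k dict k)

-- ===== LEMMAS AND PROOFS =====

-- positive values, and the descending sort B computes (ascending in the key -v)
def pvPos (l : List Int) : List Int := l.filter (fun v => decide (v > 0))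
def pvDesc (l : List Int) : List Int := PySem.List.sorted l (fun v => -v)

-- the inner scan's running max is the fold of max
theorem pvScan_fst (l : List (String × Int)) : ∀ (m : Int) (o : Option String),
    (l.foldl (fun a p => if p.2 > a.1 then (p.2, some p.1) else a) (m, o)).1
      = l.foldl (fun a p => max a p.2) m := by
  induction l with
  | nil => intro m o; rfl
  | cons p t ih =>
      intro m o
      simp only [List.foldl_cons]
      split_ifs with h
      · rw [ih, max_eq_right (le_of_lt h)]
      · rw [ih, max_eq_left (by omega)]

-- if nothing beats the running max, the scan state is unchanged
theorem pvScan_unchanged (l : List (String × Int)) : ∀ (m : Int) (o : Option String),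
    (∀ p ∈ l, p.2 ≤ m) →
    l.foldl (fun a p => if p.2 > a.1 then (p.2, some p.1) else a) (m, o) = (m, o) := by
  induction l with
  | nil => intro m o _; rfl
  | cons p t ih =>
      intro m o h
      simp only [List.foldl_cons]
      rw [if_neg (by have := h p (by simp); omega)]
      exact ih m o (fun q hq => h q (by simp [hq]))

-- the scan either keeps its initial state or returns a key/value pair of the list
theorem pvScan_cases (l : List (String × Int)) : ∀ (m : Int) (o : Option String),
    (l.foldl (fun a p => if p.2 > a.1 then (p.2, some p.1) else a) (m, o) = (m, o)) ∨
    ∃ km, (l.foldl (fun a p => if p.2 > a.1 then (p.2, some p.1) else a) (m, o)).2 = some km ∧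
      (km, (l.foldl (fun a p => if p.2 > a.1 then (p.2, some p.1) else a) (m, o)).1) ∈ l := by
  induction l with
  | nil => intro m o; left; rfl
  | cons p t ih =>
      intro m o
      simp only [List.foldl_cons]
      split_ifs with h
      · rcases ih p.2 (some p.1) with h1 | ⟨km, h2, h3⟩
        · right; exact ⟨p.1, by rw [h1], by rw [h1]; simp⟩
        · right; exact ⟨km, h2, by simp [h3]⟩
      · rcases ih m o with h1 | ⟨km, h2, h3⟩
        · left; exact h1
        · right; exact ⟨km, h2, by simp [h3]⟩

-- a dict all of whose values are ≤ 0 yields k zeros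
theorem pvLoop_zero : ∀ (n : Nat) (d : PySem.Dict String Int) (pal : List Int),
    (∀ p ∈ d.items, p.2 ≤ 0) → paletteLoop d pal n = pal ++ List.replicate n 0 := by
  intro n
  induction n with
  | zero => intro d pal _; simp [paletteLoop]
  | succ n ih =>
      intro d pal h
      simp only [paletteLoop]
      rw [pvScan_unchanged d.items 0 none h]
      rw [ih d (pal ++ [(((0 : Int), (none : Option String))).1]) h]
      simp [List.replicate_succ]

theorem pvPos_nil (d : PySem.Dict String Int) (h : ∀ p ∈ d.items, p.2 ≤ 0) :
    pvPos d.values = [] := by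
  apply List.filter_eq_nil_iff.mpr
  intro v hv
  simp only [PySem.Dict.values] at hv
  rcases List.mem_map.mp hv with ⟨p, hp, rfl⟩
  simpa using h p hp

-- prepending the maximum to a descending sort
theorem pvDesc_cons (M : Int) (l l' : List Int) (hperm : l.Perm (M :: l'))
    (hmax : ∀ v ∈ l, v ≤ M) : pvDesc l = M :: pvDesc l' := by
  unfold pvDesc
  have hinj : Function.Injective (fun v : Int => -v) := fun a b h => by
    simpa using congrArg Neg.neg h
  rw [PySem.List.sorted_eq_sorted_of_perm l (M :: l') (fun v => -v) hinj hperm]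
  apply PySem.List.eq_of_perm_of_pairwise_le_of_injective (fun v : Int => -v) hinj
  · exact (PySem.List.sorted_perm (M :: l') (fun v => -v) false).trans
      (((PySem.List.sorted_perm l' (fun v => -v) false).cons M).symm)
  · exact PySem.List.sorted_pairwise (M :: l') (fun v => -v)
  · constructor
    · intro y hy
      have hy' : y ∈ l' := (PySem.List.sorted_perm l' (fun v => -v) false).mem_iff.mp hy
      have : y ∈ l := hperm.mem_iff.mpr (by simp [hy'])
      simpa using hmax y this
    · exact PySem.List.sorted_pairwise l' (fun v => -v)

-- setting the (unique) key holding the positive value M to -1 removes one occurrence of M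
-- from the positive values
theorem pvPos_insert (d : PySem.Dict String Int) (km : String) (M : Int)
    (hnd : d.keys.Nodup) (hmem : (km, M) ∈ d.items) (hM : 0 < M) :
    (pvPos d.values).Perm (M :: pvPos (d.insert km (-1)).values) := by
  rcases List.append_of_mem hmem with ⟨pre, suf, hsplit⟩
  have hkeys : d.keys = pre.map Prod.fst ++ km :: suf.map Prod.fst := by
    simp [PySem.Dict.keys, hsplit]
  have hpre : km ∉ pre.map Prod.fst := by
    rw [hkeys] at hnd
    have hdis := (List.nodup_append.mp hnd).2.2
    intro hk; exact hdis km hk km (by simp) rfl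
  have hsuf : km ∉ suf.map Prod.fst := by
    rw [hkeys] at hnd
    exact (List.nodup_cons.mp (List.nodup_append.mp hnd).2.1).1
  have hcont : d.contains km = true := by
    rw [PySem.Dict.contains_iff_mem_keys, hkeys]; simp
  have hmapfix : ∀ (l : List (String × Int)), km ∉ l.map Prod.fst →
      l.map (fun p => if (p.1 == km) = true then (km, (-1 : Int)) else p) = l := by
    intro l hl
    have h : ∀ p ∈ l, (if (p.1 == km) = true then (km, (-1 : Int)) else p) = id p := by
      intro p hp
      have : p.1 ≠ km := fun h => hl (h ▸ List.mem_map_of_mem hp)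
      simp [this]
    rw [List.map_congr_left h, List.map_id]
  have hitems : (d.insert km (-1)).items
      = pre ++ (km, (-1 : Int)) :: suf := by
    rw [PySem.Dict.items_insert_of_contains d (-1) hcont, hsplit]
    rw [List.map_append, List.map_cons, hmapfix pre hpre, hmapfix suf hsuf]
    simp
  have hvals : pvPos d.values
      = pvPos (pre.map Prod.snd) ++ M :: pvPos (suf.map Prod.snd) := by
    simp [pvPos, PySem.Dict.values, hsplit, List.filter_append, hM]
  have hvals' : pvPos (d.insert km (-1)).values
      = pvPos (pre.map Prod.snd) ++ pvPos (suf.map Prod.snd) := by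
    simp [pvPos, PySem.Dict.values, hitems, List.filter_append]
  rw [hvals, hvals']
  exact List.perm_middle

-- main loop invariant: A's loop appends the descending positive values, padded with zeros
theorem pvLoop_main : ∀ (n : Nat) (d : PySem.Dict String Int) (pal : List Int),
    d.keys.Nodup →
    paletteLoop d pal n
      = pal ++ ((pvDesc (pvPos d.values)).take n
          ++ List.replicate (n - (pvDesc (pvPos d.values)).length) 0) := by
  intro n
  induction n with
  | zero => intro d pal _; simp [paletteLoop]
  | succ n ih =>
      intro d pal hnd
      have hfst := pvScan_fst d.items 0 none
      have hmax := PySem.List.le_foldl_max_int d.items Prod.snd 0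
      set s := d.items.foldl (fun a p => if p.2 > a.1 then (p.2, some p.1) else a)
        ((0 : Int), (none : Option String)) with hs
      by_cases hM : s.1 ≤ 0
      · -- no positive value: everything from here on is zeros
        have hall : ∀ p ∈ d.items, p.2 ≤ 0 := by
          intro p hp
          have := hmax.2 p hp
          rw [← hfst] at this
          omega
        rw [pvLoop_zero (n + 1) d pal hall, pvPos_nil d hall]
        simp [pvDesc, PySem.List.sorted]
      · -- the scan found the maximal positive value M at key km
        rw [not_le] at hM
        rcases pvScan_cases d.items 0 none with h1 | ⟨km, h2, h3⟩
        · rw [← hs] at h1; rw [h1] at hM; simp at hM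
        · rw [← hs] at h2 h3
          have hperm := pvPos_insert d km s.1 hnd h3 hM
          have hvmax : ∀ v ∈ pvPos d.values, v ≤ s.1 := by
            intro v hv
            have hv' : v ∈ d.values := List.mem_of_mem_filter hv
            simp only [PySem.Dict.values] at hv'
            rcases List.mem_map.mp hv' with ⟨p, hp, rfl⟩
            have := hmax.2 p hp
            rw [← hfst] at this
            exact this
          have hdesc := pvDesc_cons s.1 (pvPos d.values)
            (pvPos (d.insert km (-1)).values) hperm hvmax
          simp only [paletteLoop, ← hs, h2]
          rw [ih (d.insert km (-1)) (pal ++ [s.1]) (PySem.Dict.nodup_keys_insert d km (-1) hnd)]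
          rw [hdesc]
          simp [List.take_succ_cons, List.length_cons]
  
-- ===== VERDICT (by name: the statement is the Claim_ definition above) =====
theorem palette_k_spec : Claim_equal_palette_k := by
  intro dict k _
  unfold Spec_palette_k palette_k palette_k_alt
  rw [pvLoop_main k.toNat (PySem.Dict.ofList dict) [] (PySem.Dict.nodup_keys_ofList dict)]
  simp only [List.nil_append]
  have h1 : (max k 0).toNat = k.toNat := by omega
  have h2 : ∀ L : Nat, (max k 0 - (L : Int)).toNat = k.toNat - L := by intro L; omega
  rw [h1, h2]
  rfl
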